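-- pv_equiv track=rewrite | github.com/maxou285/python | MesProgrammes/Prologin/Exercice 3.py | force_maximale
-- ===== SOURCE A (Python) =====
-- from typing import List
--
-- def force_maximale(longueur: int, tunnel: List[int]) -> None:
--
--     #:param longueur: la longueur (en mètres) du passage souterrain
--     #:param tunnel: le tableau représentant les zones sûres et les zones de danger du passage souterrain. Un chiffre par mètre : Un `0` correspond à une position dans une zone sûre, et un `1` correspond à une position dans une zone de danger
--
--
--     # TODO Afficher la valeur de force maximale que Joseph Nageant peut obtenir
--     # en passant le tunnel.
--     max_esquive = 0  # Représente la valeur de E (longueur maximale d'une séquence de zones dangereuses)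
--     min_repos = float('inf')  # Représente la valeur de R (longueur minimale d'une séquence de zones sûres)
--
--     # Variables pour parcourir les séquences
--     current_length = 0
--     in_danger = tunnel[0] == 1  # True si on commence dans une zone dangereuse, False sinon
--
--     for i in range(longueur):
--         if tunnel[i] == 1:  # Zone dangereuse
--             if not in_danger:  # Transition depuis une zone sûre
--                 # Mettre à jour min_repos
--                 if current_length > 0:
--                     min_repos = min(min_repos, current_length)
--                 # Réinitialiser la longueur actuelle pour la zone dangereuse
--                 current_length = 1
--                 in_danger = True
--             else:
--                 current_length += 1  # On continue dans la zone dangereuse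
--         else:  # Zone sûre
--             if in_danger:  # Transition depuis une zone dangereuse
--                 # Mettre à jour max_esquive
--                 max_esquive = max(max_esquive, current_length)
--                 # Réinitialiser la longueur actuelle pour la zone sûre
--                 current_length = 1
--                 in_danger = False
--             else:
--                 current_length += 1  # On continue dans la zone sûre
--
--     # Mettre à jour pour la dernière séquence
--     if in_danger:
--         max_esquive = max(max_esquive, current_length)
--     else:
--         min_repos = min(min_repos, current_length)
--
--     # Si aucune zone sûre n'est trouvée, alors il n'y a pas de repos possible
--     if min_repos == float('inf'):
--         min_repos = 0  # Pas de repos possible si le tunnel est entièrement dangereux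
--
--     # Calcul de la force
--     force_maximale = min_repos - max_esquive
--     return force_maximale, min_repos, max_esquive
-- ===== SOURCE B (Python) =====
-- from itertools import groupby
--
-- def force_maximale(longueur, tunnel):
--     runs = [(key, sum(1 for _ in grp))
--             for key, grp in groupby(x == 1 for x in tunnel[:max(longueur, 0)])]
--     max_esquive = max((n for k, n in runs if k), default=0)
--     min_repos = min((n for k, n in runs if not k), default=0)
--     return min_repos - max_esquive, min_repos, max_esquive
-- ===== Notes on version B (the rewrite author's own statement) =====
-- stated objective: idiomatic
-- what changed: A's single-pass transition state machine (current run length, in-danger flag, inf sentinel) is replaced by segmenting the scanned prefix into maximal runs with itertools.groupby and taking max/min of the run lengths with default 0.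
import Mathlib
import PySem

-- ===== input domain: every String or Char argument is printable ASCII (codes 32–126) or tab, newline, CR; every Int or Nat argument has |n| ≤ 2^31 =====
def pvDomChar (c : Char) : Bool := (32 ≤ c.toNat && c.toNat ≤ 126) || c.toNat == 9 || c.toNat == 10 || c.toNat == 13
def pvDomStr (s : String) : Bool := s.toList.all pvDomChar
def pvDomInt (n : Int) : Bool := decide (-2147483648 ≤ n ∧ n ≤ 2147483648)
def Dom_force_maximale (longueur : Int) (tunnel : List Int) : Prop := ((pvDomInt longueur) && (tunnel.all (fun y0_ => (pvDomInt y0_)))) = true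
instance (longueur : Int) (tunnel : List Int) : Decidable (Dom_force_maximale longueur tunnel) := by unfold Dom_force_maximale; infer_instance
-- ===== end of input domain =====

-- B replaces A's per-element state machine by segmenting the prefix into maximal runs
-- with itertools.groupby and aggregating run lengths with max/min (objective: idiomatic).
-- Pre_ excludes exactly the inputs where A raises IndexError (empty tunnel, or longueur
-- beyond the list's length).

-- ===== PORT A =====
-- min(min_repos, current_length) where min_repos starts at float('inf'):
-- the Option models the 'inf' sentinel exactly (none = inf).
def pyMinInf : Option Int → Int → Option Int
  | none,   c => some c
  | some m, c => some (min m c)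

-- one iteration of A's for-loop; state = (max_esquive, min_repos, current_length, in_danger)
def stepA : Int × Option Int × Int × Bool → Int → Int × Option Int × Int × Bool
  | (maxE, minR, cur, inD), x =>
    if x == 1 then
      if !inD then
        (maxE, (if cur > 0 then pyMinInf minR cur else minR), 1, true)
      else
        (maxE, minR, cur + 1, true)
    else
      if inD then
        (max maxE cur, minR, 1, false)
      else
        (maxE, minR, cur + 1, inD)

-- tunnel[0] and tunnel[i] are ported with pyGetD: Pre_force_maximale guarantees every
-- access is in range, so the default is never read.
def force_maximale (longueur : Int) (tunnel : List Int) : Int × Int × Int :=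
  let st := (PySem.List.pyRange 0 longueur).foldl
      (fun s i => stepA s (PySem.List.pyGetD tunnel i 0))
      (0, none, 0, PySem.List.pyGetD tunnel 0 0 == 1)
  match st with
  | (maxE, minR, cur, inD) =>
    let fin : Int × Option Int := if inD then (max maxE cur, minR) else (maxE, pyMinInf minR cur)
    let minR' : Int := match fin.2 with | none => 0 | some m => m   -- 'if min_repos == inf: min_repos = 0'
    (minR' - fin.1, minR', fin.1)

-- ===== PORT B =====
-- itertools.groupby: accumulate runs in reverse (cons), then reverse to Python's order
def runsRevStep (acc : List (Bool × Int)) (b : Bool) : List (Bool × Int) :=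
  match acc with
  | (k, n) :: rest => if k == b then (k, n + 1) :: rest else (b, 1) :: (k, n) :: rest
  | [] => [(b, 1)]

def groupRuns (bs : List Bool) : List (Bool × Int) := (bs.foldl runsRevStep []).reverse

def force_maximale_alt (longueur : Int) (tunnel : List Int) : Int × Int × Int :=
  let pref := PySem.List.slice tunnel none (some (max longueur 0))   -- tunnel[:max(longueur, 0)]
  let runs := groupRuns (pref.map (fun x => x == 1))
  let maxE := PySem.List.maxD ((runs.filter (fun kn => kn.1)).map (fun kn => kn.2)) (fun y => y) 0
  let minR := PySem.List.minD ((runs.filter (fun kn => !kn.1)).map (fun kn => kn.2)) (fun y => y) 0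
  (minR - maxE, minR, maxE)

-- ===== PRECONDITION & SPEC =====
-- Pre_ excludes exactly the inputs on which A raises IndexError: an empty tunnel
-- (tunnel[0]) or longueur larger than the list length (tunnel[i] in the loop).
def Pre_force_maximale (longueur : Int) (tunnel : List Int) : Prop :=
  tunnel ≠ [] ∧ longueur ≤ (tunnel.length : Int)
instance (longueur : Int) (tunnel : List Int) : Decidable (Pre_force_maximale longueur tunnel) := by
  unfold Pre_force_maximale; infer_instance

def pvWitness_force_maximale : Int × List Int := (6, [1, 1, 0, 0, 0, 1])

def Spec_force_maximale (longueur : Int) (tunnel : List Int) (out : Int × Int × Int) : Prop := out = force_maximale_alt longueur tunnel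
instance (longueur : Int) (tunnel : List Int) (out : Int × Int × Int) : Decidable (Spec_force_maximale longueur tunnel out) := by unfold Spec_force_maximale; infer_instance

-- ===== CLAIM (what is proved, stated in full; the proofs are below) =====
def Claim_equal_force_maximale : Prop := ∀ (longueur : Int) (tunnel : List Int), Dom_force_maximale longueur tunnel → Pre_force_maximale longueur tunnel → Spec_force_maximale longueur tunnel (force_maximale longueur tunnel)

-- ===== LEMMAS AND PROOFS =====

lemma foldl_pyMinInf (xs : List Int) (a : Int) :
    xs.foldl pyMinInf (some a) = some (xs.foldl min a) := by
  induction xs generalizing a with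
  | nil => rfl
  | cons x xs ih => simpa [pyMinInf] using ih (min a x)

lemma maxD_eq_foldl (l : List Int) (hpos : ∀ x ∈ l, 1 ≤ x) :
    PySem.List.maxD l (fun y => y) 0 = l.foldl max 0 := by
  cases l with
  | nil => simp [PySem.List.maxD_nil]
  | cons x xs =>
    have hx : (1:Int) ≤ x := hpos x (by simp)
    rw [PySem.List.maxD_id_cons, List.foldl_cons, show max (0:Int) x = x by omega]

lemma minD_eq_foldl (l : List Int) :
    PySem.List.minD l (fun y => y) 0 = (match l.foldl pyMinInf none with | none => 0 | some m => m) := by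
  cases l with
  | nil => simp [PySem.List.minD_nil]
  | cons x xs =>
    rw [PySem.List.minD_id_cons, List.foldl_cons,
      show pyMinInf none x = some x from rfl, foldl_pyMinInf]

lemma foldl_ifmax (l : List (Bool × Int)) (a : Int) :
    l.foldl (fun a kn => if kn.1 then max a kn.2 else a) a
      = ((l.filter (fun kn => kn.1)).map (fun kn => kn.2)).foldl max a := by
  induction l generalizing a with
  | nil => rfl
  | cons kn l ih => cases hk : kn.1 <;> simp [hk, ih]

lemma foldl_ifmin (l : List (Bool × Int)) (o : Option Int) :
    l.foldl (fun o kn => if kn.1 then o else pyMinInf o kn.2) o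
      = ((l.filter (fun kn => !kn.1)).map (fun kn => kn.2)).foldl pyMinInf o := by
  induction l generalizing o with
  | nil => rfl
  | cons kn l ih => cases hk : kn.1 <;> simp [hk, ih]

def Mfold (rs : List (Bool × Int)) : Int :=
  rs.foldr (fun kn a => if kn.1 then max a kn.2 else a) 0

def mfold (rs : List (Bool × Int)) : Option Int :=
  rs.foldr (fun kn o => if kn.1 then o else pyMinInf o kn.2) none

lemma Mfold_eq (rs : List (Bool × Int)) (hpos : ∀ p ∈ rs, 1 ≤ p.2) :
    PySem.List.maxD (((rs.reverse).filter (fun kn => kn.1)).map (fun kn => kn.2)) (fun y => y) 0 = Mfold rs := by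
  rw [maxD_eq_foldl, ← foldl_ifmax, List.foldl_reverse]
  · rfl
  · intro x hx
    simp only [List.mem_map, List.mem_filter, List.mem_reverse] at hx
    obtain ⟨p, ⟨hp, _⟩, rfl⟩ := hx
    exact hpos p hp

lemma mfold_eq (rs : List (Bool × Int)) :
    PySem.List.minD (((rs.reverse).filter (fun kn => !kn.1)).map (fun kn => kn.2)) (fun y => y) 0
      = (match mfold rs with | none => 0 | some m => m) := by
  rw [minD_eq_foldl, ← foldl_ifmin, List.foldl_reverse]
  rfl

lemma invA (h : Int) (t : List Int) :
    ∃ k c rest,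
      ((h :: t).map (fun x => x == 1)).foldl runsRevStep [] = (k, c) :: rest ∧
      (∀ p ∈ (k, c) :: rest, 1 ≤ p.2) ∧
      (h :: t).foldl stepA (0, none, 0, h == 1) = (Mfold rest, mfold rest, c, k) := by
  induction t using List.reverseRecOn with
  | nil =>
    refine ⟨h == 1, 1, [], by simp [runsRevStep], by simp, ?_⟩
    cases hb : (h == 1) <;> simp [stepA, hb, Mfold, mfold]
  | append_singleton t x ih =>
    obtain ⟨k, c, rest, h1, hpos, h2⟩ := ih
    have hc : (1:Int) ≤ c := hpos (k, c) (by simp)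
    have hmap : ((h :: (t ++ [x])).map (fun x => x == 1))
        = ((h :: t).map (fun x => x == 1)) ++ [x == 1] := by simp
    have hfold1 : ((h :: (t ++ [x])).map (fun x => x == 1)).foldl runsRevStep []
        = runsRevStep ((k, c) :: rest) (x == 1) := by
      rw [hmap, List.foldl_append, h1]; rfl
    have hfold2 : (h :: (t ++ [x])).foldl stepA (0, none, 0, h == 1)
        = stepA (Mfold rest, mfold rest, c, k) x := by
      rw [show h :: (t ++ [x]) = (h :: t) ++ [x] from rfl, List.foldl_append, h2]; rfl
    by_cases hkx : k = (x == 1)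
    · -- same group: length increments
      refine ⟨k, c + 1, rest, ?_, ?_, ?_⟩
      · rw [hfold1]; simp [runsRevStep, hkx]
      · intro p hp
        rcases List.mem_cons.mp hp with rfl | hp
        · simpa using by omega
        · exact hpos p (List.mem_cons_of_mem _ hp)
      · rw [hfold2]
        cases hx : (x == 1) <;> rw [hx] at hkx <;> subst hkx <;>
          simp [stepA, hx]
    · -- new group starts
      refine ⟨x == 1, 1, (k, c) :: rest, ?_, ?_, ?_⟩
      · rw [hfold1]; simp [runsRevStep]
        intro hkk; exact absurd hkk hkx
      · intro p hp
        rcases List.mem_cons.mp hp with rfl | hp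
        · simp
        · exact hpos p hp
      · rw [hfold2]
        cases hx : (x == 1) <;> rw [hx] at hkx
        · -- x ≠ 1, so k must be true
          have hk : k = true := by revert hkx; cases k <;> simp
          subst hk
          simp [stepA, hx, Mfold, mfold]
        · have hk : k = false := by revert hkx; cases k <;> simp
          subst hk
          simp [stepA, hx, Mfold, mfold, show c > 0 by omega]

lemma foldl_range_take {β : Type} (xs : List Int) (L : Int) (h0 : 0 ≤ L)
    (hL : L ≤ (xs.length : Int)) (f : β → Int → β) (init : β) :
    (PySem.List.pyRange 0 L).foldl (fun s i => f s (PySem.List.pyGetD xs i 0)) init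
      = (xs.take L.toNat).foldl f init := by
  have hlen : PySem.List.len (xs.take L.toNat) = L := by
    rw [PySem.List.len_eq]; simp; omega
  have hcongr : (PySem.List.pyRange 0 L).foldl (fun s i => f s (PySem.List.pyGetD xs i 0)) init
      = (PySem.List.pyRange 0 L).foldl (fun s i => f s (PySem.List.pyGetD (xs.take L.toNat) i 0)) init := by
    apply PySem.List.foldl_congr_mem
    intro acc j hj
    obtain ⟨hj0, hjL⟩ := PySem.List.mem_pyRange_one.mp hj
    rw [PySem.List.pyGetD_eq_getElem xs 0 hj0 (by omega),
        PySem.List.pyGetD_eq_getElem (xs.take L.toNat) 0 hj0 (by simp; omega)]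
    exact congrArg (f acc) (List.getElem_take).symm
  set ys := xs.take L.toNat with hys
  rw [hcongr, ← hlen, PySem.List.foldl_pyRange_pyGetD ys 0 f init le_rfl]
  simp

-- ===== VERDICT (by name: the statement is the Claim_ definition above) =====
theorem force_maximale_spec : Claim_equal_force_maximale := by
  intro longueur tunnel _ hpre
  obtain ⟨hne, hlenle⟩ := hpre
  unfold Spec_force_maximale force_maximale force_maximale_alt
  by_cases hL : longueur ≤ 0
  · have hmax : max longueur 0 = 0 := by omega
    rw [hmax, PySem.List.slice_to _ le_rfl, PySem.List.pyRange_one_eq_nil hL]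
    cases hd : (PySem.List.pyGetD tunnel 0 0 == 1) <;>
      simp [pyMinInf, groupRuns, PySem.List.maxD_nil, PySem.List.minD_nil]
  · have hL' : 0 < longueur := by omega
    have hmax : max longueur 0 = longueur := by omega
    rw [hmax, PySem.List.slice_to _ (by omega),
      foldl_range_take tunnel longueur (by omega) hlenle,
      PySem.List.pyGetD_eq_getElem tunnel 0 le_rfl (by have := List.length_pos_of_ne_nil hne; omega)]
    obtain ⟨h0, rest, rfl⟩ := List.exists_cons_of_ne_nil hne
    obtain ⟨n, hn⟩ : ∃ n, longueur.toNat = n + 1 := ⟨longueur.toNat - 1, by omega⟩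
    rw [hn]
    simp only [List.take_succ_cons, Int.toNat_zero, List.getElem_cons_zero]
    obtain ⟨k, c, rs, hruns, hpos, hstate⟩ := invA h0 (rest.take n)
    rw [hstate]
    simp only [groupRuns, hruns]
    rw [Mfold_eq ((k, c) :: rs) hpos, mfold_eq ((k, c) :: rs)]
    cases k <;> simp [Mfold, mfold]
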